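-- pv_equiv track=rewrite | github.com/Jairo-Urbina/branch-and-bound | modelo/Continental.py | calcularMovimientos
-- ===== SOURCE A (Python) =====
-- def calcularMovimientos(fila, columna, direccion):
--     '''
--     Crea y llena una matriz de 3x2 que contiene los indices de movimiento de la ficha
--     :param fila: filas
--     :param columna: columnas
--     :param direccion: dirección que se va a revisar
--     :return: la matriz de movimiento
--     '''
--     move = []
--     for i in range(3):
--         move.append([])
--         for j in range(2):
--             move[i].append(None)
--
--
--     '''La posición 0,0 tendrá la fila de incio'''
--     move[0][0] = fila
--
--     '''La posición 0,1 tendrá la columna de inicio'''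
--     move[0][1] = columna
--
--     if direccion == "ARRIBA":
--         move[1][0] = fila - 1
--         move[1][1] = columna
--         move[2][0] = fila - 2
--         move[2][1] = columna
--
--     elif direccion == "IZQUIERDA":
--         move[1][0] = fila
--         move[1][1] = columna - 1
--         move[2][0] = fila
--         move[2][1] = columna - 2
--
--     elif direccion == "DERECHA":
--         move[1][0] = fila
--         move[1][1] = columna + 1
--         move[2][0] = fila
--         move[2][1] = columna + 2
--
--     elif direccion == "ABAJO":
--         move[1][0] = fila + 1
--         move[1][1] = columna
--         move[2][0] = fila + 2
--         move[2][1] = columna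
--     return move
-- ===== SOURCE B (Python) =====
-- def calcularMovimientos(fila, columna, direccion):
--     # Symmetry reduction: build one canonical path along the first axis, then
--     # reflect/transpose it, instead of filling a None matrix via four branches.
--     vertical = direccion in ("ARRIBA", "ABAJO")
--     horizontal = direccion in ("IZQUIERDA", "DERECHA")
--     if not (vertical or horizontal):
--         return [[fila, columna], [None, None], [None, None]]
--     s = -1 if direccion in ("ARRIBA", "IZQUIERDA") else 1
--     p, q = (fila, columna) if vertical else (columna, fila)
--     path = [[p + s * k, q] for k in range(3)]
--     if horizontal:
--         path = [[b, a] for a, b in path]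
--     return path
-- ===== Notes on version B (the rewrite author's own statement) =====
-- stated objective: alternative
-- what changed: Instead of allocating a 3x2 None matrix and filling it through four per-direction branches, B builds one canonical path [p+s*k, q] for k=0..2 along a single axis and obtains horizontal directions by transposing each row (a symmetry reduction), with the sign taken from the direction.
import Mathlib
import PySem

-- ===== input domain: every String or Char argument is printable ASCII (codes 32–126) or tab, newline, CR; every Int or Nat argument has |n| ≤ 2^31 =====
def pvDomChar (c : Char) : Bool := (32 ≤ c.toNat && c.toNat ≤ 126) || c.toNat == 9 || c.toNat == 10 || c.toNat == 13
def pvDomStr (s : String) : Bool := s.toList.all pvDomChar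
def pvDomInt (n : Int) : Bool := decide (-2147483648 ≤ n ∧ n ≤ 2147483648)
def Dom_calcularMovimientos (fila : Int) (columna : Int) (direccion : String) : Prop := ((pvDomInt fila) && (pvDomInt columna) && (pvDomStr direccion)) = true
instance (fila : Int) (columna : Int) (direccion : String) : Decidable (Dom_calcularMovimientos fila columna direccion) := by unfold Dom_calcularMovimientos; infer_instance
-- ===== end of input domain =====

-- B replaces the None-matrix build plus four copy-paste branches by one canonical path along a single axis plus a reflection/transposition (objective: alternative).

-- ===== PORT A =====
-- move[i][j] = v  (indices are in range throughout A, so plain set)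
def pvSet2 (m : List (List (Option Int))) (i j : Nat) (v : Int) : List (List (Option Int)) :=
  m.set i ((m.getD i []).set j (some v))

def calcularMovimientos (fila : Int) (columna : Int) (direccion : String) : List (List (Option Int)) :=
  -- for i in range(3): move.append([]); for j in range(2): move[i].append(None)
  let move : List (List (Option Int)) :=
    (List.range 3).foldl (fun m _ => m ++ [(List.range 2).foldl (fun r _ => r ++ [none]) []]) []
  let move := pvSet2 move 0 0 fila
  let move := pvSet2 move 0 1 columna
  if direccion = "ARRIBA" then
    let move := pvSet2 move 1 0 (fila - 1)
    let move := pvSet2 move 1 1 columna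
    let move := pvSet2 move 2 0 (fila - 2)
    pvSet2 move 2 1 columna
  else if direccion = "IZQUIERDA" then
    let move := pvSet2 move 1 0 fila
    let move := pvSet2 move 1 1 (columna - 1)
    let move := pvSet2 move 2 0 fila
    pvSet2 move 2 1 (columna - 2)
  else if direccion = "DERECHA" then
    let move := pvSet2 move 1 0 fila
    let move := pvSet2 move 1 1 (columna + 1)
    let move := pvSet2 move 2 0 fila
    pvSet2 move 2 1 (columna + 2)
  else if direccion = "ABAJO" then
    let move := pvSet2 move 1 0 (fila + 1)
    let move := pvSet2 move 1 1 columna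
    let move := pvSet2 move 2 0 (fila + 2)
    pvSet2 move 2 1 columna
  else move

-- ===== PORT B =====
def calcularMovimientos_alt (fila : Int) (columna : Int) (direccion : String) : List (List (Option Int)) :=
  let vertical := direccion == "ARRIBA" || direccion == "ABAJO"
  let horizontal := direccion == "IZQUIERDA" || direccion == "DERECHA"
  if !(vertical || horizontal) then
    [[some fila, some columna], [none, none], [none, none]]
  else
    let s : Int := if direccion == "ARRIBA" || direccion == "IZQUIERDA" then -1 else 1
    let pq : Int × Int := if vertical then (fila, columna) else (columna, fila)
    let path := (List.range 3).map (fun k => [some (pq.1 + s * (k : Int)), some pq.2])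
    if horizontal then
      path.map (fun r => match r with | [a, b] => [b, a] | r => r)
    else path

-- ===== PRECONDITION & SPEC =====
def Spec_calcularMovimientos (fila : Int) (columna : Int) (direccion : String) (out : List (List (Option Int))) : Prop := out = calcularMovimientos_alt fila columna direccion
instance (fila : Int) (columna : Int) (direccion : String) (out : List (List (Option Int))) : Decidable (Spec_calcularMovimientos fila columna direccion out) := by unfold Spec_calcularMovimientos; infer_instance

-- ===== CLAIM (what is proved, stated in full; the proofs are below) =====
def Claim_equal_calcularMovimientos : Prop := ∀ (fila : Int) (columna : Int) (direccion : String), Dom_calcularMovimientos fila columna direccion → Spec_calcularMovimientos fila columna direccion (calcularMovimientos fila columna direccion)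

-- ===== LEMMAS AND PROOFS =====

-- ===== VERDICT (by name: the statement is the Claim_ definition above) =====
theorem calcularMovimientos_spec : Claim_equal_calcularMovimientos := by
  intro fila columna direccion _
  unfold Spec_calcularMovimientos calcularMovimientos calcularMovimientos_alt
  by_cases h1 : direccion = "ARRIBA"
  · subst h1
    simp [pvSet2, List.range_succ]
    constructor <;> ring
  by_cases h2 : direccion = "IZQUIERDA"
  · subst h2
    simp [pvSet2, List.range_succ]
    constructor <;> ring
  by_cases h3 : direccion = "DERECHA"
  · subst h3
    simp [pvSet2, List.range_succ]
  by_cases h4 : direccion = "ABAJO"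
  · subst h4
    simp [pvSet2, List.range_succ]
  simp [pvSet2, List.range_succ, h1, h2, h3, h4]
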